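-- pv_equiv track=rewrite | github.com/BuloZB/BuloCloudSentinel | sentinelweb/backend/sentinel_web/utils/plugin.py | replace_imports
-- ===== SOURCE A (Python) =====
-- def replace_imports(content):
--     """
--     Replace the import paths in the content.
--     """
--     replacements = {
--         "from utils": "from sentinel_web.utils",
--         "from apps": "from sentinel_web.apps",
--         "from main": "from sentinel_web.main",
--         "from config": "from sentinel_web.config",
--     }
--
--     for old, new in replacements.items():
--         content = content.replace(old, new)
--
--     return content
-- ===== SOURCE B (Python) =====
-- def replace_imports(content):
--     """
--     Replace the import paths in the content.
--     """
--     subs = (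
--         ("from utils", "from sentinel_web.utils"),
--         ("from apps", "from sentinel_web.apps"),
--         ("from main", "from sentinel_web.main"),
--         ("from config", "from sentinel_web.config"),
--     )
--     out = []
--     i = 0
--     n = len(content)
--     while i < n:
--         for old, new in subs:
--             if content.startswith(old, i):
--                 out.append(new)
--                 i += len(old)
--                 break
--         else:
--             out.append(content[i])
--             i += 1
--     return "".join(out)
-- ===== Notes on version B (the rewrite author's own statement) =====
-- stated objective: alternative
-- what changed: A runs four sequential whole-string replace passes (one per import prefix); B scans the content once left-to-right, trying the four patterns at each position and emitting the replacement or the current character.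
import Mathlib
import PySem

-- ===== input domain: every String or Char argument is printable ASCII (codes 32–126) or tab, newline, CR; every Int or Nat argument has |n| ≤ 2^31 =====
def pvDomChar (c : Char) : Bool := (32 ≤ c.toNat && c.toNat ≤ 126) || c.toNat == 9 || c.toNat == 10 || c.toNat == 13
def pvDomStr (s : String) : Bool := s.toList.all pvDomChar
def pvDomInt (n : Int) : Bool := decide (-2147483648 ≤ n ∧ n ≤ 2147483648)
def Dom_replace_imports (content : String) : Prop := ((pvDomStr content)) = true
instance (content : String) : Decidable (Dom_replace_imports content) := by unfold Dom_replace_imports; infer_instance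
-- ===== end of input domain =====

-- B rewrites the content in ONE left-to-right pass that tries the four "from X" patterns at each
-- position, instead of A's four sequential whole-string replace passes; the return values are equal.


-- ===== PORT A =====
-- the dict literal of A
def pvReplacements : PySem.Dict String String :=
  ((((PySem.Dict.empty).insert "from utils" "from sentinel_web.utils").insert
      "from apps" "from sentinel_web.apps").insert
      "from main" "from sentinel_web.main").insert
      "from config" "from sentinel_web.config"

-- A: `for old, new in replacements.items(): content = content.replace(old, new)`
def replace_imports (content : String) : String :=
  pvReplacements.items.foldl (fun content p => PySem.Str.replace content p.1 p.2) content

-- ===== PORT B =====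
-- Source B's (old, new) tuple table, as List Char pairs (B scans the code points of content)
def pvSubs : List (List Char × List Char) :=
  [("from utils".toList, "from sentinel_web.utils".toList),
   ("from apps".toList, "from sentinel_web.apps".toList),
   ("from main".toList, "from sentinel_web.main".toList),
   ("from config".toList, "from sentinel_web.config".toList)]

-- Source B's `while i < n` loop, transcribed as recursion on the remaining suffix of content
-- (content.startswith(old, i) = old.isPrefixOf (the suffix at i)); the inner for/else tries
-- the four pairs in order, appending `new` and skipping len(old), else copying one char.
def onePassGo : List Char → List Char
  | [] => []
  | c :: t =>
    if (pvSubs[0]!).1.isPrefixOf (c :: t) then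
      (pvSubs[0]!).2 ++ onePassGo ((c :: t).drop (pvSubs[0]!).1.length)
    else if (pvSubs[1]!).1.isPrefixOf (c :: t) then
      (pvSubs[1]!).2 ++ onePassGo ((c :: t).drop (pvSubs[1]!).1.length)
    else if (pvSubs[2]!).1.isPrefixOf (c :: t) then
      (pvSubs[2]!).2 ++ onePassGo ((c :: t).drop (pvSubs[2]!).1.length)
    else if (pvSubs[3]!).1.isPrefixOf (c :: t) then
      (pvSubs[3]!).2 ++ onePassGo ((c :: t).drop (pvSubs[3]!).1.length)
    else
      c :: onePassGo t
  termination_by l => l.length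
  decreasing_by all_goals simp [pvSubs]

def replace_imports_alt (content : String) : String :=
  String.ofList (onePassGo content.toList)

-- ===== PRECONDITION & SPEC =====
def Spec_replace_imports (content : String) (out : String) : Prop := out = replace_imports_alt content
instance (content : String) (out : String) : Decidable (Spec_replace_imports content out) := by unfold Spec_replace_imports; infer_instance

-- ===== CLAIM (what is proved, stated in full; the proofs are below) =====
def Claim_equal_replace_imports : Prop := ∀ (content : String), Dom_replace_imports content → Spec_replace_imports content (replace_imports content)

-- ===== LEMMAS AND PROOFS =====

-- the four patterns (q) and replacements (r), and the pattern tails (t, after the common head 'f')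
def pq1 : List Char := "from utils".toList
def pq2 : List Char := "from apps".toList
def pq3 : List Char := "from main".toList
def pq4 : List Char := "from config".toList
def pt1 : List Char := "rom utils".toList
def pt2 : List Char := "rom apps".toList
def pt3 : List Char := "rom main".toList
def pt4 : List Char := "rom config".toList
def pr1 : List Char := "from sentinel_web.utils".toList
def pr2 : List Char := "from sentinel_web.apps".toList
def pr3 : List Char := "from sentinel_web.main".toList
def pr4 : List Char := "from sentinel_web.config".toList

-- structural version of PySem.Chars.replace for a nonempty pattern o :: old'
def repW (o : Char) (old' new : List Char) : List Char → List Char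
  | [] => []
  | c :: t =>
    if (o :: old').isPrefixOf (c :: t) then
      new ++ repW o old' new ((c :: t).drop (o :: old').length)
    else
      c :: repW o old' new t
  termination_by l => l.length
  decreasing_by all_goals simp

theorem repW_go_spec (o : Char) (old' new : List Char) :
    ∀ (fuel : Nat) (l acc : List Char), l.length ≤ fuel →
      PySem.Chars.replace.go (o :: old') new fuel l acc = acc.reverse ++ repW o old' new l := by
  intro fuel
  induction fuel with
  | zero =>
    intro l acc hl
    have : l = [] := List.eq_nil_of_length_eq_zero (Nat.le_zero.mp hl)
    subst this
    simp [PySem.Chars.replace.go, repW]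
  | succ n ih =>
    intro l acc hl
    cases l with
    | nil => simp [PySem.Chars.replace.go, repW]
    | cons c t =>
      rw [PySem.Chars.replace.go]
      rw [repW]
      split
      · rw [ih _ _ (by simp at hl ⊢; omega)]
        simp
      · rw [ih _ _ (by simp at hl ⊢; omega)]
        simp

theorem replace_eq_repW (o : Char) (old' new l : List Char) :
    PySem.Chars.replace l (o :: old') new = repW o old' new l := by
  rw [PySem.Chars.replace]
  simp [repW_go_spec o old' new l.length l [] (le_refl _)]

-- `Clash p a k = true`: the pattern p visibly mismatches a at offset k, inside a itself
def Clash (p a : List Char) (k : Nat) : Bool :=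
  (List.range p.length).any (fun m => decide (k + m < a.length) && (p[m]? != a[k + m]?))

theorem not_prefix_of_clash {p a x : List Char} {k : Nat} (h : Clash p a k = true) :
    ¬ p <+: (a ++ x).drop k := by
  rintro ⟨rest, hrest⟩
  obtain ⟨m, hm, hcond⟩ := List.any_eq_true.mp h
  rw [List.mem_range] at hm
  simp only [Bool.and_eq_true, decide_eq_true_eq, bne_iff_ne] at hcond
  obtain ⟨hka, hne⟩ := hcond
  apply hne
  calc p[m]? = (p ++ rest)[m]? := (List.getElem?_append_left hm).symm
    _ = ((a ++ x).drop k)[m]? := by rw [hrest]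
    _ = (a ++ x)[k + m]? := List.getElem?_drop
    _ = a[k + m]? := List.getElem?_append_left hka

theorem Clash_cons_succ (p : List Char) (d : Char) (a : List Char) (k : Nat)
    (h : Clash p (d :: a) (k + 1) = true) : Clash p a k = true := by
  obtain ⟨m, hm, hcond⟩ := List.any_eq_true.mp h
  apply List.any_eq_true.mpr
  refine ⟨m, hm, ?_⟩
  simp only [Bool.and_eq_true, decide_eq_true_eq, bne_iff_ne] at hcond ⊢
  obtain ⟨hka, hne⟩ := hcond
  constructor
  · simp at hka; omega
  · have : (d :: a)[k + 1 + m]? = a[k + m]? := by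
      rw [show k + 1 + m = (k + m) + 1 by omega]
      simp
    rw [this] at hne
    exact hne

-- a block a through which no match of the pattern can start passes through repW unchanged
theorem cleanAppend (o : Char) (old' new : List Char) (a x : List Char)
    (h : ∀ k, k < a.length → Clash (o :: old') a k = true) :
    repW o old' new (a ++ x) = a ++ repW o old' new x := by
  induction a with
  | nil => simp
  | cons d a' ih =>
    rw [List.cons_append, repW]
    rw [if_neg]
    · rw [ih (fun k hk => Clash_cons_succ _ _ _ _ (h (k + 1) (by simp; omega))), List.cons_append]
    · intro hpre
      exact not_prefix_of_clash (x := x) (k := 0) (h 0 (by simp)) (by simpa using List.isPrefixOf_iff_prefix.mp hpre)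

-- a match at position 0 is replaced
theorem repW_pat (o : Char) (old' new rest : List Char) :
    repW o old' new ((o :: old') ++ rest) = new ++ repW o old' new rest := by
  rw [List.cons_append, repW]
  rw [if_pos (List.isPrefixOf_iff_prefix.mpr (by exact List.prefix_append _ _))]
  simp [List.drop_left']

-- no match at position 0 copies one char
theorem repW_char (o : Char) (old' new : List Char) (c : Char) (x : List Char)
    (h : ¬ (o :: old') <+: (c :: x)) :
    repW o old' new (c :: x) = c :: repW o old' new x := by
  rw [repW, if_neg (fun hp => h (List.isPrefixOf_iff_prefix.mp hp))]

-- `ClashS P new k = true`: the suffix of P from k ≥ 1 visibly mismatches the replacement new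
def ClashS (P new : List Char) (k : Nat) : Bool :=
  (List.range (P.length - k)).any (fun m => decide (m < new.length) && (P[k + m]? != new[m]?))

-- a proper suffix of a pattern P found as a prefix of repW's output was already there:
-- repW never manufactures material a pattern suffix could newly match
theorem stable (o : Char) (old' new P : List Char)
    (hcl : ∀ k, k < P.length → 1 ≤ k → ClashS P new k = true) :
    ∀ (n : Nat) (x : List Char), x.length ≤ n → ∀ k, 1 ≤ k →
      P.drop k <+: repW o old' new x → P.drop k <+: x := by
  intro n
  induction n with
  | zero =>
    intro x hx k _ h
    have : x = [] := List.eq_nil_of_length_eq_zero (Nat.le_zero.mp hx)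
    subst this
    simpa [repW] using h
  | succ n ih =>
    intro x hx k hk h
    by_cases hkP : k < P.length
    case neg =>
      simp [List.drop_eq_nil_of_le (by omega : P.length ≤ k)]
    case pos =>
      cases x with
      | nil => simpa [repW] using h
      | cons c t =>
        rw [repW] at h
        split at h
        case isTrue hp =>
          -- output starts with `new`; the clash inside new is a contradiction
          exfalso
          obtain ⟨rest, hrest⟩ := h
          obtain ⟨m, hm, hcond⟩ := List.any_eq_true.mp (hcl k hkP hk)
          rw [List.mem_range] at hm
          simp only [Bool.and_eq_true, decide_eq_true_eq, bne_iff_ne] at hcond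
          obtain ⟨hmn, hne⟩ := hcond
          apply hne
          calc P[k + m]? = (P.drop k)[m]? := List.getElem?_drop.symm
            _ = (P.drop k ++ rest)[m]? := (List.getElem?_append_left (by simp; omega)).symm
            _ = (new ++ repW o old' new ((c :: t).drop (o :: old').length))[m]? := by rw [hrest]
            _ = new[m]? := List.getElem?_append_left hmn
        case isFalse hp =>
          rw [List.drop_eq_getElem_cons hkP] at h ⊢
          rw [List.cons_prefix_cons] at h
          exact List.cons_prefix_cons.mpr ⟨h.1, ih t (by simp at hx; omega) (k + 1) (by omega) h.2⟩

-- if a pattern e :: P does not match at the head of c :: x, it also does not match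
-- at the head of c :: repW … x
theorem head_pres (o : Char) (old' new : List Char) (e : Char) (P : List Char) (c : Char) (x : List Char)
    (hcl : ∀ k, k < (e :: P).length → 1 ≤ k → ClashS (e :: P) new k = true)
    (h : ¬ (e :: P) <+: (c :: x)) :
    ¬ (e :: P) <+: (c :: repW o old' new x) := by
  intro hq
  rw [List.cons_prefix_cons] at hq
  apply h
  rw [List.cons_prefix_cons]
  refine ⟨hq.1, ?_⟩
  have := stable o old' new (e :: P) hcl x.length x (le_refl _) 1 (le_refl _) (by simpa using hq.2)
  simpa using this

-- the four entries of Source B's table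
theorem pvSubs00 : (pvSubs[0]!).1 = pq1 := rfl
theorem pvSubs01 : (pvSubs[0]!).2 = pr1 := rfl
theorem pvSubs10 : (pvSubs[1]!).1 = pq2 := rfl
theorem pvSubs11 : (pvSubs[1]!).2 = pr2 := rfl
theorem pvSubs20 : (pvSubs[2]!).1 = pq3 := rfl
theorem pvSubs21 : (pvSubs[2]!).2 = pr3 := rfl
theorem pvSubs30 : (pvSubs[3]!).1 = pq4 := rfl
theorem pvSubs31 : (pvSubs[3]!).2 = pr4 := rfl

-- onePassGo equations
theorem onePass_nil : onePassGo [] = [] := by rw [onePassGo]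

theorem onePass_q1 (t : List Char) : onePassGo (pq1 ++ t) = pr1 ++ onePassGo t := by
  show onePassGo ('f' :: (pt1 ++ t)) = _
  rw [onePassGo]
  simp only [pvSubs00, pvSubs01]
  rw [if_pos (List.isPrefixOf_iff_prefix.mpr (show pq1 <+: 'f' :: (pt1 ++ t) from List.prefix_append pq1 t))]
  show pr1 ++ onePassGo ((pq1 ++ t).drop pq1.length) = _
  rw [List.drop_left]

theorem onePass_q2 (t : List Char) (h1 : ¬ pq1 <+: pq2 ++ t) :
    onePassGo (pq2 ++ t) = pr2 ++ onePassGo t := by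
  show onePassGo ('f' :: (pt2 ++ t)) = _
  rw [onePassGo]
  simp only [pvSubs00, pvSubs10, pvSubs11]
  rw [if_neg (show ¬ (pq1.isPrefixOf ('f' :: (pt2 ++ t)) = true) from fun hp => h1 (List.isPrefixOf_iff_prefix.mp hp))]
  rw [if_pos (List.isPrefixOf_iff_prefix.mpr (show pq2 <+: 'f' :: (pt2 ++ t) from List.prefix_append pq2 t))]
  show pr2 ++ onePassGo ((pq2 ++ t).drop pq2.length) = _
  rw [List.drop_left]

theorem onePass_q3 (t : List Char) (h1 : ¬ pq1 <+: pq3 ++ t) (h2 : ¬ pq2 <+: pq3 ++ t) :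
    onePassGo (pq3 ++ t) = pr3 ++ onePassGo t := by
  show onePassGo ('f' :: (pt3 ++ t)) = _
  rw [onePassGo]
  simp only [pvSubs00, pvSubs10, pvSubs20, pvSubs21]
  rw [if_neg (show ¬ (pq1.isPrefixOf ('f' :: (pt3 ++ t)) = true) from fun hp => h1 (List.isPrefixOf_iff_prefix.mp hp))]
  rw [if_neg (show ¬ (pq2.isPrefixOf ('f' :: (pt3 ++ t)) = true) from fun hp => h2 (List.isPrefixOf_iff_prefix.mp hp))]
  rw [if_pos (List.isPrefixOf_iff_prefix.mpr (show pq3 <+: 'f' :: (pt3 ++ t) from List.prefix_append pq3 t))]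
  show pr3 ++ onePassGo ((pq3 ++ t).drop pq3.length) = _
  rw [List.drop_left]

theorem onePass_q4 (t : List Char) (h1 : ¬ pq1 <+: pq4 ++ t) (h2 : ¬ pq2 <+: pq4 ++ t)
    (h3 : ¬ pq3 <+: pq4 ++ t) :
    onePassGo (pq4 ++ t) = pr4 ++ onePassGo t := by
  show onePassGo ('f' :: (pt4 ++ t)) = _
  rw [onePassGo]
  simp only [pvSubs00, pvSubs10, pvSubs20, pvSubs30, pvSubs31]
  rw [if_neg (show ¬ (pq1.isPrefixOf ('f' :: (pt4 ++ t)) = true) from fun hp => h1 (List.isPrefixOf_iff_prefix.mp hp))]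
  rw [if_neg (show ¬ (pq2.isPrefixOf ('f' :: (pt4 ++ t)) = true) from fun hp => h2 (List.isPrefixOf_iff_prefix.mp hp))]
  rw [if_neg (show ¬ (pq3.isPrefixOf ('f' :: (pt4 ++ t)) = true) from fun hp => h3 (List.isPrefixOf_iff_prefix.mp hp))]
  rw [if_pos (List.isPrefixOf_iff_prefix.mpr (show pq4 <+: 'f' :: (pt4 ++ t) from List.prefix_append pq4 t))]
  show pr4 ++ onePassGo ((pq4 ++ t).drop pq4.length) = _
  rw [List.drop_left]

theorem onePass_char (c : Char) (x : List Char) (h1 : ¬ pq1 <+: c :: x) (h2 : ¬ pq2 <+: c :: x)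
    (h3 : ¬ pq3 <+: c :: x) (h4 : ¬ pq4 <+: c :: x) :
    onePassGo (c :: x) = c :: onePassGo x := by
  rw [onePassGo]
  simp only [pvSubs00, pvSubs10, pvSubs20, pvSubs30]
  rw [if_neg (fun hp => h1 (List.isPrefixOf_iff_prefix.mp hp))]
  rw [if_neg (fun hp => h2 (List.isPrefixOf_iff_prefix.mp hp))]
  rw [if_neg (fun hp => h3 (List.isPrefixOf_iff_prefix.mp hp))]
  rw [if_neg (fun hp => h4 (List.isPrefixOf_iff_prefix.mp hp))]

-- A's four passes, composed
def repA (l : List Char) : List Char :=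
  repW 'f' pt4 pr4 (repW 'f' pt3 pr3 (repW 'f' pt2 pr2 (repW 'f' pt1 pr1 l)))

theorem main_lemma : ∀ (n : Nat) (s : List Char), s.length ≤ n → repA s = onePassGo s := by
  intro n
  induction n with
  | zero =>
    intro s hs
    have : s = [] := List.eq_nil_of_length_eq_zero (Nat.le_zero.mp hs)
    subst this
    simp [repA, repW, onePass_nil]
  | succ n ih =>
    intro s hs
    by_cases h1 : pq1 <+: s
    · obtain ⟨t, rfl⟩ := h1
      have ht : t.length ≤ n := by
        simp only [List.length_append, show pq1.length = 10 from rfl] at hs; omega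
      rw [onePass_q1 t]
      unfold repA
      rw [show (pq1 : List Char) = 'f' :: pt1 from rfl]
      rw [repW_pat]
      rw [cleanAppend 'f' pt2 pr2 pr1 _ (by decide)]
      rw [cleanAppend 'f' pt3 pr3 pr1 _ (by decide)]
      rw [cleanAppend 'f' pt4 pr4 pr1 _ (by decide)]
      have hA := ih t ht; unfold repA at hA; rw [hA]
    by_cases h2 : pq2 <+: s
    · obtain ⟨t, rfl⟩ := h2
      have ht : t.length ≤ n := by
        simp only [List.length_append, show pq2.length = 9 from rfl] at hs; omega
      rw [onePass_q2 t h1]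
      unfold repA
      rw [cleanAppend 'f' pt1 pr1 pq2 t (by decide)]
      rw [show (pq2 : List Char) = 'f' :: pt2 from rfl]
      rw [repW_pat]
      rw [cleanAppend 'f' pt3 pr3 pr2 _ (by decide)]
      rw [cleanAppend 'f' pt4 pr4 pr2 _ (by decide)]
      have hA := ih t ht; unfold repA at hA; rw [hA]
    by_cases h3 : pq3 <+: s
    · obtain ⟨t, rfl⟩ := h3
      have ht : t.length ≤ n := by
        simp only [List.length_append, show pq3.length = 9 from rfl] at hs; omega
      rw [onePass_q3 t h1 h2]
      unfold repA
      rw [cleanAppend 'f' pt1 pr1 pq3 t (by decide)]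
      rw [cleanAppend 'f' pt2 pr2 pq3 _ (by decide)]
      rw [show (pq3 : List Char) = 'f' :: pt3 from rfl]
      rw [repW_pat]
      rw [cleanAppend 'f' pt4 pr4 pr3 _ (by decide)]
      have hA := ih t ht; unfold repA at hA; rw [hA]
    by_cases h4 : pq4 <+: s
    · obtain ⟨t, rfl⟩ := h4
      have ht : t.length ≤ n := by
        simp only [List.length_append, show pq4.length = 11 from rfl] at hs; omega
      rw [onePass_q4 t h1 h2 h3]
      unfold repA
      rw [cleanAppend 'f' pt1 pr1 pq4 t (by decide)]
      rw [cleanAppend 'f' pt2 pr2 pq4 _ (by decide)]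
      rw [cleanAppend 'f' pt3 pr3 pq4 _ (by decide)]
      rw [show (pq4 : List Char) = 'f' :: pt4 from rfl]
      rw [repW_pat]
      have hA := ih t ht; unfold repA at hA; rw [hA]
    · cases s with
      | nil => simp [repA, repW, onePass_nil]
      | cons c x =>
        have hx : x.length ≤ n := by simp at hs; omega
        have h2a : ¬ pq2 <+: c :: repW 'f' pt1 pr1 x :=
          head_pres 'f' pt1 pr1 'f' pt2 c x (by decide) h2
        have h3a : ¬ pq3 <+: c :: repW 'f' pt1 pr1 x :=
          head_pres 'f' pt1 pr1 'f' pt3 c x (by decide) h3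
        have h3b : ¬ pq3 <+: c :: repW 'f' pt2 pr2 (repW 'f' pt1 pr1 x) :=
          head_pres 'f' pt2 pr2 'f' pt3 c _ (by decide) h3a
        have h4a : ¬ pq4 <+: c :: repW 'f' pt1 pr1 x :=
          head_pres 'f' pt1 pr1 'f' pt4 c x (by decide) h4
        have h4b : ¬ pq4 <+: c :: repW 'f' pt2 pr2 (repW 'f' pt1 pr1 x) :=
          head_pres 'f' pt2 pr2 'f' pt4 c _ (by decide) h4a
        have h4c : ¬ pq4 <+: c :: repW 'f' pt3 pr3 (repW 'f' pt2 pr2 (repW 'f' pt1 pr1 x)) :=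
          head_pres 'f' pt3 pr3 'f' pt4 c _ (by decide) h4b
        unfold repA
        rw [repW_char 'f' pt1 pr1 c x h1]
        rw [repW_char 'f' pt2 pr2 c _ h2a]
        rw [repW_char 'f' pt3 pr3 c _ h3b]
        rw [repW_char 'f' pt4 pr4 c _ h4c]
        rw [onePass_char c x h1 h2 h3 h4]
        have hA := ih x hx; unfold repA at hA; rw [hA]

-- the items of A's dict literal
theorem pv_items :
    pvReplacements.items =
      [("from utils", "from sentinel_web.utils"), ("from apps", "from sentinel_web.apps"),
       ("from main", "from sentinel_web.main"), ("from config", "from sentinel_web.config")] := by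
  decide

-- ===== VERDICT (by name: the statement is the Claim_ definition above) =====
theorem replace_imports_spec : Claim_equal_replace_imports := by
  intro content _
  unfold Spec_replace_imports replace_imports_alt
  rw [← String.toList_inj, String.toList_ofList]
  unfold replace_imports
  rw [pv_items]
  simp only [List.foldl, PySem.Str.toList_replace]
  rw [show ∀ l, PySem.Chars.replace l "from utils".toList "from sentinel_web.utils".toList
        = repW 'f' pt1 pr1 l from fun l => replace_eq_repW 'f' pt1 pr1 l]
  rw [show ∀ l, PySem.Chars.replace l "from apps".toList "from sentinel_web.apps".toList
        = repW 'f' pt2 pr2 l from fun l => replace_eq_repW 'f' pt2 pr2 l]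
  rw [show ∀ l, PySem.Chars.replace l "from main".toList "from sentinel_web.main".toList
        = repW 'f' pt3 pr3 l from fun l => replace_eq_repW 'f' pt3 pr3 l]
  rw [show ∀ l, PySem.Chars.replace l "from config".toList "from sentinel_web.config".toList
        = repW 'f' pt4 pr4 l from fun l => replace_eq_repW 'f' pt4 pr4 l]
  have hA := main_lemma content.toList.length content.toList (le_refl _)
  unfold repA at hA
  exact hA
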